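-- pv_equiv track=rewrite | github.com/zeze98/Algorithm | 프로그래머스/3/49189. 가장 먼 노드/가장 먼 노드.py | solution
-- ===== SOURCE A (Python) =====
-- from collections import deque
--
-- def solution(n, edge):
--     answer = [[1]]
--     tree = [[] for _ in range(n+1)]
--     q = deque([[1]])
--     visit = [[True] for _ in range(n+1)]
--
--     for a, b in edge:
--         tree[a].append(b)
--         tree[b].append(a)
--
--     while q:
--         start = q.popleft()
--         temp = []
--         for i in start:
--             visit[i] = False
--         for j in start:
--             for node in tree[j]:
--                 if visit[node]:
--                     temp.append(node)
--         temp = list(set(temp))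
--         if len(temp) == 0:
--             break
--         q.append(temp)
--         answer.append(temp)
--
--     return len(answer[-1])
-- ===== SOURCE B (Python) =====
-- def solution(n, edge):
--     adj = [[] for _ in range(n + 1)]
--     for a, b in edge:
--         adj[a].append(b)
--         adj[b].append(a)
--     dist = [-1] * (n + 1)
--     dist[1] = 0
--     d = 0
--     while True:
--         nxt = [w for v in range(n + 1) if dist[v] == d for w in adj[v] if dist[w] == -1]
--         if not nxt:
--             return dist.count(d)
--         for w in nxt:
--             dist[w] = d + 1
--         d += 1
-- ===== Notes on version B (the rewrite author's own statement) =====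
-- stated objective: alternative
-- what changed: Replaces the deque of level-lists with set() dedup and a visited-flag array by a single distance array relaxed in rounds (scan all vertices currently at distance d, stamp unmarked neighbours d+1) and returns dist.count(d) at the last round; no queue, no set objects, no answer history.
-- outside the precondition, e.g. on solution(2, [[1, -1], [1, 2]]): A returns 2, B returns 1
import Mathlib
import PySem

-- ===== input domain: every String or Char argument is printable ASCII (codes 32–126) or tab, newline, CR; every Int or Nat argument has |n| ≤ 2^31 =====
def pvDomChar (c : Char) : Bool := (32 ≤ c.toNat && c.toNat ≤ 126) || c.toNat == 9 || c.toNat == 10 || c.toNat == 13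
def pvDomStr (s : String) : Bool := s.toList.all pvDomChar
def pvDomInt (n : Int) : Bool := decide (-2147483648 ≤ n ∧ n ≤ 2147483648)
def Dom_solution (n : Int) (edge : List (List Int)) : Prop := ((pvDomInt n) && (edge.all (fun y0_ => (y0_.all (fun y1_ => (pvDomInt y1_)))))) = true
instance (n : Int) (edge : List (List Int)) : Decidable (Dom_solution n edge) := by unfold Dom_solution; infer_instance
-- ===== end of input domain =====

-- B replaces A's deque of level-lists (with set() dedup and visited flags) by a distance
-- array relaxed round by round, returning dist.count of the last distance: an alternative
-- algorithm of similar cost, proved to return the same count on the stated domain.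

-- ===== PORT A =====
-- shared by both ports: both Pythons build the adjacency list with the identical loop
-- 'for a, b in edge: tree[a].append(b); tree[b].append(a)'.
-- A malformed row (length ≠ 2) raises ValueError in Python: outside Pre_, left unchanged here.
def addEdge (tree : List (List Int)) (e : List Int) : List (List Int) :=
  match e with
  | [a, b] =>
    let t1 := PySem.List.pySetD tree a (PySem.List.pyGetD tree a [] ++ [b])
    PySem.List.pySetD t1 b (PySem.List.pyGetD t1 b [] ++ [a])
  | _ => tree

def buildTree (n : Int) (edge : List (List Int)) : List (List Int) :=
  edge.foldl addEdge (List.replicate (n + 1).toNat [])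

-- A's while loop; the deque holds at most one level at a time, carried as `start`.
-- fuel only makes the recursion structural: under Pre_ it is proved never to run out.
def solutionLoopA (tree : List (List Int)) (fuel : Nat) (visit : List Bool)
    (start : List Int) (answer : List (List Int)) : Int :=
  match fuel with
  | 0 => 0
  | f + 1 =>
    let visit2 := start.foldl (fun vs i => PySem.List.pySetD vs i false) visit
    let temp := start.foldl (fun acc j =>
        (PySem.List.pyGetD tree j []).foldl (fun acc2 node =>
          if PySem.List.pyGetD visit2 node false then acc2 ++ [node] else acc2) acc) []
    let temp2 : List Int := PySem.Set.ofList temp     -- temp = list(set(temp))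
    if temp2.length = 0 then ((answer.getLastD []).length : Int)
    else solutionLoopA tree f visit2 temp2 (answer ++ [temp2])

def solution (n : Int) (edge : List (List Int)) : Int :=
  let tree := buildTree n edge
  let visit := List.replicate (n + 1).toNat true     -- visit[i] = [True], truthy ⇒ Bool true
  solutionLoopA tree (n.toNat + 2 * edge.length + 2) visit [1] [[1]]

-- ===== PORT B =====
-- B's while loop: one round stamps every unmarked neighbour of a distance-d vertex with d+1.
def solutionLoopB (N : Nat) (adj : List (List Int)) (fuel : Nat) (dist : List Int) (d : Int) : Int :=
  match fuel with
  | 0 => 0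
  | f + 1 =>
    let nxt := (List.range N).foldl (fun (acc : List Int) (v : Nat) =>
        if PySem.List.pyGetD dist (v : Int) 0 = d then
          acc ++ (PySem.List.pyGetD adj (v : Int) []).filter
                   (fun w => PySem.List.pyGetD dist w 0 == -1)
        else acc) []
    if nxt.length = 0 then (dist.count d : Int)
    else solutionLoopB N adj f (nxt.foldl (fun ds w => PySem.List.pySetD ds w (d + 1)) dist) (d + 1)

def solution_alt (n : Int) (edge : List (List Int)) : Int :=
  let adj := buildTree n edge
  let dist := PySem.List.pySetD (List.replicate (n + 1).toNat (-1)) 1 0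
  solutionLoopB (n + 1).toNat adj (n.toNat + 2) dist 0

-- ===== PRECONDITION & SPEC =====
-- Pre_ admits the inputs on which A returns normally (n >= 1, every row a pair of labels in
-- -(n+1)..n; outside that range A raises IndexError, on a non-pair row ValueError), except
-- inputs where two distinct labels share the same list slot modulo n+1: there Python's
-- negative-index wraparound makes A count one slot under two names (e.g. -1 and n), an
-- accidental artefact of list indexing excluded here (see claim cites).
def Pre_solution (n : Int) (edge : List (List Int)) : Prop :=
  1 ≤ n ∧ (∀ e ∈ edge, e.length = 2 ∧ ∀ x ∈ e, -(n + 1) ≤ x ∧ x ≤ n) ∧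
  (∀ e ∈ edge, ∀ x ∈ e, ∀ e' ∈ edge, ∀ y ∈ e', x % (n + 1) = y % (n + 1) → x = y)
instance (n : Int) (edge : List (List Int)) : Decidable (Pre_solution n edge) := by
  unfold Pre_solution; infer_instance

def pvWitness_solution : Int × List (List Int) := (3, [[1, 2], [2, 3], [1, 3]])

def Spec_solution (n : Int) (edge : List (List Int)) (out : Int) : Prop := out = solution_alt n edge
instance (n : Int) (edge : List (List Int)) (out : Int) : Decidable (Spec_solution n edge out) := by
  unfold Spec_solution; infer_instance

-- ===== CLAIM (what is proved, stated in full; the proofs are below) =====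
def Claim_equal_solution : Prop := ∀ (n : Int) (edge : List (List Int)),
  Dom_solution n edge → Pre_solution n edge → Spec_solution n edge (solution n edge)

-- ===== LEMMAS AND PROOFS =====

-- the slot a label occupies in a Python list of length n+1 (negative indices wrap)
def slotOf (n x : Int) : Nat := if x < 0 then (x + (n + 1)).toNat else x.toNat

theorem slot_lt (n x : Int) (hn : 1 ≤ n) (hlo : -(n + 1) ≤ x) (hhi : x ≤ n) :
    slotOf n x < (n + 1).toNat := by
  unfold slotOf; split_ifs <;> omega

theorem slot_one (n : Int) : slotOf n 1 = 1 := by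
  unfold slotOf; split_ifs <;> omega

theorem emod_eq_slot (n x : Int) (hn : 1 ≤ n) (hlo : -(n + 1) ≤ x) (hhi : x ≤ n) :
    x % (n + 1) = ((slotOf n x : Nat) : Int) := by
  unfold slotOf
  split_ifs with h
  · have h2 : (x + (n + 1)) % (n + 1) = x % (n + 1) := by
      simpa using Int.add_mul_emod_self_left (a := x) (b := n + 1) (c := 1)
    rw [← h2, Int.emod_eq_of_lt (by omega) (by omega)]
    omega
  · rw [Int.emod_eq_of_lt (by omega) (by omega)]
    omega

theorem pyIdx_slot (n : Int) (L : Nat) (hL : L = (n + 1).toNat) (hn : 1 ≤ n)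
    (i : Int) (hlo : -(n + 1) ≤ i) (hhi : i ≤ n) :
    PySem.List.pyIdx? L i = some (slotOf n i) := by
  unfold PySem.List.pyIdx? slotOf
  split_ifs <;> try (exfalso; omega)
  all_goals (first | rfl | (congr 1; omega))

theorem pyGetD_slot {α : Type} (n : Int) (xs : List α) (i : Int) (d : α) (hn : 1 ≤ n)
    (hlen : xs.length = (n + 1).toNat) (hlo : -(n + 1) ≤ i) (hhi : i ≤ n) :
    PySem.List.pyGetD xs i d = xs.getD (slotOf n i) d := by
  unfold PySem.List.pyGetD PySem.List.pyGet?
  rw [show PySem.List.pyIdx? xs.length i = some (slotOf n i) from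
    pyIdx_slot n xs.length (by rw [hlen]) hn i hlo hhi]
  simp [List.getD_eq_getElem?_getD]

theorem pySetD_slot {α : Type} (n : Int) (xs : List α) (i : Int) (v : α) (hn : 1 ≤ n)
    (hlen : xs.length = (n + 1).toNat) (hlo : -(n + 1) ≤ i) (hhi : i ≤ n) :
    PySem.List.pySetD xs i v = xs.set (slotOf n i) v := by
  unfold PySem.List.pySetD PySem.List.pySet?
  rw [show PySem.List.pyIdx? xs.length i = some (slotOf n i) from
    pyIdx_slot n xs.length (by rw [hlen]) hn i hlo hhi]
  rfl

-- the invariant tying A's (visit flags, current frontier of labels) to B's distance array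
def LoopInv (n : Int) (visit : List Bool) (dist : List Int) (F : List Int) (d : Int) : Prop :=
  visit.length = (n + 1).toNat ∧ dist.length = (n + 1).toNat ∧
  F.Nodup ∧ (∀ x ∈ F, -(n + 1) ≤ x ∧ x ≤ n) ∧
  (∀ x ∈ F, ∀ y ∈ F, slotOf n x = slotOf n y → x = y) ∧ 0 ≤ d ∧
  (∀ k : Nat, k < (n + 1).toNat →
     ((∃ x ∈ F, slotOf n x = k) ↔ dist.getD k 0 = d) ∧
      (visit.getD k false = true ↔ (dist.getD k 0 = -1 ∨ dist.getD k 0 = d)) ∧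
      (dist.getD k 0 = -1 ∨ (0 ≤ dist.getD k 0 ∧ dist.getD k 0 ≤ d)))

theorem length_addEdge (t : List (List Int)) (e : List Int) : (addEdge t e).length = t.length := by
  rcases e with _ | ⟨a, _ | ⟨b, _ | ⟨c, r⟩⟩⟩ <;> simp [addEdge, PySem.List.length_pySetD]

theorem foldl_addEdge_length : ∀ (es : List (List Int)) (t : List (List Int)),
    (es.foldl addEdge t).length = t.length := by
  intro es
  induction es with
  | nil => intro t; rfl
  | cons e es ih => intro t; simp only [List.foldl_cons]; rw [ih, length_addEdge]

theorem length_buildTree (n : Int) (edge : List (List Int)) :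
    (buildTree n edge).length = (n + 1).toNat := by
  unfold buildTree; rw [foldl_addEdge_length]; simp

theorem pyGetD_nil_sub {α : Type} (t : List (List α)) (i : Int) :
    ∀ w ∈ PySem.List.pyGetD t i [], ∃ l ∈ t, w ∈ l := by
  intro w hw
  unfold PySem.List.pyGetD at hw
  cases h : PySem.List.pyGet? t i with
  | none => rw [h] at hw; simp at hw
  | some l => rw [h] at hw; exact ⟨l, PySem.List.mem_of_pyGet?_eq_some t h, hw⟩

theorem mem_pySetD {α : Type} (t : List α) (i : Int) (v : α) :
    ∀ l ∈ PySem.List.pySetD t i v, l ∈ t ∨ l = v := by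
  intro l hl
  unfold PySem.List.pySetD PySem.List.pySet? at hl
  cases h : PySem.List.pyIdx? t.length i with
  | none => rw [h] at hl; simp at hl; exact Or.inl hl
  | some k => rw [h] at hl; simp at hl; exact List.mem_or_eq_of_mem_set hl

theorem set_append_pres (P : Int → Prop) (t : List (List Int)) (i x : Int)
    (ht : ∀ l ∈ t, ∀ w ∈ l, P w) (hx : P x) :
    ∀ l ∈ PySem.List.pySetD t i (PySem.List.pyGetD t i [] ++ [x]), ∀ w ∈ l, P w := by
  intro l hl w hw
  rcases mem_pySetD _ _ _ l hl with h | h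
  · exact ht l h w hw
  · subst h
    rcases List.mem_append.1 hw with h | h
    · obtain ⟨l', hl', hwl'⟩ := pyGetD_nil_sub t i w h
      exact ht l' hl' w hwl'
    · simp at h; subst h; exact hx

theorem addEdge_pres (P : Int → Prop) (t : List (List Int)) (e : List Int)
    (ht : ∀ l ∈ t, ∀ w ∈ l, P w) (he : ∀ x ∈ e, P x) :
    ∀ l ∈ addEdge t e, ∀ w ∈ l, P w := by
  rcases e with _ | ⟨a, _ | ⟨b, _ | ⟨c, r⟩⟩⟩
  · exact ht
  · exact ht
  · simp only [addEdge]
    exact set_append_pres P _ b a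
      (set_append_pres P t a b ht (he b (by simp))) (he a (by simp))
  · exact ht

theorem buildTree_pres (n : Int) (edge : List (List Int)) (P : Int → Prop)
    (hedge : ∀ e ∈ edge, ∀ x ∈ e, P x) :
    ∀ l ∈ buildTree n edge, ∀ w ∈ l, P w := by
  unfold buildTree
  have main : ∀ (es : List (List Int)) (t : List (List Int)),
      (∀ e ∈ es, ∀ x ∈ e, P x) → (∀ l ∈ t, ∀ w ∈ l, P w) →
      ∀ l ∈ es.foldl addEdge t, ∀ w ∈ l, P w := by
    intro es
    induction es with
    | nil => intro t _ ht; exact ht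
    | cons e es ih =>
      intro t hes ht
      simp only [List.foldl_cons]
      exact ih _ (fun e' he' => hes e' (List.mem_cons_of_mem _ he'))
        (addEdge_pres P t e ht (hes e List.mem_cons_self))
  apply main edge _ hedge
  intro l hl
  have := List.eq_of_mem_replicate hl
  subst this; intro w hw; simp at hw

theorem getD_pySetD_slot {α : Type} (n : Int) (xs : List α) (i : Int) (v : α) (hn : 1 ≤ n)
    (hlen : xs.length = (n + 1).toNat) (hlo : -(n + 1) ≤ i) (hhi : i ≤ n)
    (k : Nat) (hk : k < (n + 1).toNat) (dflt : α) :
    (PySem.List.pySetD xs i v).getD k dflt = if slotOf n i = k then v else xs.getD k dflt := by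
  rw [pySetD_slot n xs i v hn hlen hlo hhi]
  rw [List.getD_eq_getElem _ _ (by simp; omega), List.getD_eq_getElem _ _ (by omega)]
  rw [List.getElem_set]

theorem length_foldl_pySetD {α : Type} (F : List Int) (v : α) :
    ∀ xs : List α, (F.foldl (fun ys i => PySem.List.pySetD ys i v) xs).length = xs.length := by
  induction F with
  | nil => intro xs; rfl
  | cons i F ih => intro xs; simp only [List.foldl_cons]; rw [ih, PySem.List.length_pySetD]

theorem getD_foldl_pySetD_slot {α : Type} (n : Int) (v : α) (hn : 1 ≤ n) :
    ∀ (F : List Int) (xs : List α), xs.length = (n + 1).toNat →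
    (∀ i ∈ F, -(n + 1) ≤ i ∧ i ≤ n) →
    ∀ (k : Nat) (dflt : α), k < (n + 1).toNat →
    (F.foldl (fun ys i => PySem.List.pySetD ys i v) xs).getD k dflt
      = if (∃ i ∈ F, slotOf n i = k) then v else xs.getD k dflt := by
  intro F
  induction F with
  | nil => intro xs _ _ k dflt hk; simp
  | cons i F ih =>
    intro xs hlen hF k dflt hk
    simp only [List.foldl_cons]
    have hib := hF i List.mem_cons_self
    rw [ih _ (by rw [PySem.List.length_pySetD]; exact hlen)
      (fun j hj => hF j (List.mem_cons_of_mem _ hj)) k dflt hk]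
    rw [getD_pySetD_slot n xs i v hn hlen hib.1 hib.2 k hk dflt]
    have hcons : (∃ j ∈ i :: F, slotOf n j = k) ↔ (slotOf n i = k ∨ ∃ j ∈ F, slotOf n j = k) := by
      constructor
      · rintro ⟨j, hj, hjs⟩
        rcases List.mem_cons.1 hj with rfl | hj
        · exact Or.inl hjs
        · exact Or.inr ⟨j, hj, hjs⟩
      · rintro (h | ⟨j, hj, hjs⟩)
        · exact ⟨i, List.mem_cons_self, h⟩
        · exact ⟨j, List.mem_cons_of_mem _ hj, hjs⟩
    simp only [hcons]
    by_cases h1 : ∃ j ∈ F, slotOf n j = k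
    · simp [h1]
    · by_cases h2 : slotOf n i = k <;> simp [h1, h2]

theorem foldl_append_if_id (p : Int → Bool) :
    ∀ (l acc : List Int), l.foldl (fun a x => if p x then a ++ [x] else a) acc = acc ++ l.filter p := by
  intro l
  induction l with
  | nil => intro acc; simp
  | cons x l ih =>
    intro acc
    simp only [List.foldl_cons, List.filter_cons]
    by_cases h : p x <;> simp [h, ih]

theorem mem_foldl_append (g : Int → List Int) (x : Int) :
    ∀ (l : List Int) (acc : List Int),
    (x ∈ l.foldl (fun a j => a ++ g j) acc ↔ x ∈ acc ∨ ∃ j ∈ l, x ∈ g j) := by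
  intro l
  induction l with
  | nil => intro acc; simp
  | cons j l ih =>
    intro acc
    simp only [List.foldl_cons]
    rw [ih]
    constructor
    · rintro (h | ⟨j', hj', hx⟩)
      · rcases List.mem_append.1 h with h | h
        · exact Or.inl h
        · exact Or.inr ⟨j, List.mem_cons_self, h⟩
      · exact Or.inr ⟨j', List.mem_cons_of_mem _ hj', hx⟩
    · rintro (h | ⟨j', hj', hx⟩)
      · exact Or.inl (List.mem_append.2 (Or.inl h))
      · rcases List.mem_cons.1 hj' with rfl | hj'
        · exact Or.inl (List.mem_append.2 (Or.inr hx))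
        · exact Or.inr ⟨j', hj', hx⟩

theorem mem_foldl_ite_append (q : Nat → Prop) [DecidablePred q] (g : Nat → List Int) (x : Int) :
    ∀ (l : List Nat) (acc : List Int),
    (x ∈ l.foldl (fun a v => if q v then a ++ g v else a) acc ↔ x ∈ acc ∨ ∃ v ∈ l, q v ∧ x ∈ g v) := by
  intro l
  induction l with
  | nil => intro acc; simp
  | cons v l ih =>
    intro acc
    simp only [List.foldl_cons]
    by_cases h : q v
    · rw [if_pos h, ih]
      constructor
      · rintro (hmem | ⟨v', hv', hq, hx⟩)
        · rcases List.mem_append.1 hmem with hmem | hmem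
          · exact Or.inl hmem
          · exact Or.inr ⟨v, List.mem_cons_self, h, hmem⟩
        · exact Or.inr ⟨v', List.mem_cons_of_mem _ hv', hq, hx⟩
      · rintro (hmem | ⟨v', hv', hq, hx⟩)
        · exact Or.inl (List.mem_append.2 (Or.inl hmem))
        · rcases List.mem_cons.1 hv' with rfl | hv'
          · exact Or.inl (List.mem_append.2 (Or.inr hx))
          · exact Or.inr ⟨v', hv', hq, hx⟩
    · rw [if_neg h, ih]
      constructor
      · rintro (hmem | ⟨v', hv', hq, hx⟩)
        · exact Or.inl hmem
        · exact Or.inr ⟨v', List.mem_cons_of_mem _ hv', hq, hx⟩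
      · rintro (hmem | ⟨v', hv', hq, hx⟩)
        · exact Or.inl hmem
        · rcases List.mem_cons.1 hv' with rfl | hv'
          · exact absurd hq h
          · exact Or.inr ⟨v', hv', hq, hx⟩

theorem count_eq_countP_range (l : List Int) (x : Int) :
    l.count x = (List.range l.length).countP (fun k => l.getD k 0 == x) := by
  induction l with
  | nil => simp
  | cons a t ih =>
    rw [List.count_cons, List.length_cons, List.range_succ_eq_map]
    rw [List.countP_cons, List.countP_map]
    simp only [Function.comp_def, List.getD_cons_succ, List.getD_cons_zero]
    rw [← ih]

theorem countP_range_eq_length (M : List Nat) (N : Nat) (p : Nat → Bool) (hnd : M.Nodup)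
    (h : ∀ k : Nat, k < N → (k ∈ M ↔ p k = true))
    (hrange : ∀ k ∈ M, k < N) :
    (List.range N).countP p = M.length := by
  rw [List.countP_eq_length_filter]
  have hperm : ((List.range N).filter p).Perm M := by
    rw [List.perm_ext_iff_of_nodup (List.Nodup.filter _ List.nodup_range) hnd]
    intro k
    rw [List.mem_filter, List.mem_range]
    constructor
    · rintro ⟨hkN, hpk⟩
      exact (h k hkN).2 hpk
    · intro hkM
      have hkN := hrange k hkM
      exact ⟨hkN, (h k hkN).1 hkM⟩
  rw [hperm.length_eq]

theorem countP_lt_countP (p p' : Nat → Bool) :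
    ∀ (l : List Nat), (∀ x ∈ l, p' x = true → p x = true) →
    ∀ x ∈ l, p x = true → p' x = false → l.countP p' < l.countP p := by
  intro l
  induction l with
  | nil => intro _ x hx; simp at hx
  | cons a t ih =>
    intro h x hx hp hp'
    rw [List.countP_cons, List.countP_cons]
    rcases List.mem_cons.1 hx with rfl | hxt
    · have : t.countP p' ≤ t.countP p :=
        List.countP_mono_left (fun y hy => h y (List.mem_cons_of_mem _ hy))
      simp only [hp, hp', if_true, if_false, Bool.false_eq_true]
      omega
    · have hstep : (if p' a = true then 1 else 0) ≤ (if p a = true then 1 else 0) := by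
        by_cases ha : p' a = true
        · rw [ha, h a (List.mem_cons_self) ha]
        · have ha' : p' a = false := by revert ha; cases p' a <;> simp
          simp only [ha', Bool.false_eq_true, if_false]
          omega
      have := ih (fun y hy => h y (List.mem_cons_of_mem _ hy)) x hxt hp hp'
      omega

theorem loop_eq (n : Int) (tree : List (List Int)) (hn : 1 ≤ n)
    (hlen : tree.length = (n + 1).toNat)
    (hmem : ∀ l ∈ tree, ∀ w ∈ l, -(n + 1) ≤ w ∧ w ≤ n)
    (hinj : ∀ l ∈ tree, ∀ w ∈ l, ∀ l' ∈ tree, ∀ w' ∈ l', slotOf n w = slotOf n w' → w = w') :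
    ∀ (fA fB : Nat) (visit : List Bool) (dist : List Int) (F : List Int) (d : Int)
      (answer : List (List Int)),
      LoopInv n visit dist F d →
      dist.count (-1) < fA → dist.count (-1) < fB →
      (answer.getLastD []).length = F.length →
      solutionLoopA tree fA visit F answer = solutionLoopB (n + 1).toNat tree fB dist d := by
  intro fA
  induction fA with
  | zero => intro fB visit dist F d answer _ hA _ _; omega
  | succ f ih =>
    intro fB visit dist F d answer hinv hA hB hans
    obtain ⟨hvl, hdl, hnd, hFr, hFinj, hd0, hslot⟩ := hinv
    cases fB with
    | zero => omega
    | succ fB =>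
      simp only [solutionLoopA, solutionLoopB]
      set visit2 := F.foldl (fun vs i => PySem.List.pySetD vs i false) visit with hv2def
      set temp := F.foldl (fun acc j =>
          (PySem.List.pyGetD tree j []).foldl (fun acc2 node =>
            if PySem.List.pyGetD visit2 node false then acc2 ++ [node] else acc2) acc) [] with htempdef
      set nxt := (List.range (n + 1).toNat).foldl (fun (acc : List Int) (v : Nat) =>
          if PySem.List.pyGetD dist (v : Int) 0 = d then
            acc ++ (PySem.List.pyGetD tree (v : Int) []).filter
                     (fun w => PySem.List.pyGetD dist w 0 == -1)
          else acc) [] with hnxtdef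
      set dist' := nxt.foldl (fun ds w => PySem.List.pySetD ds w (d + 1)) dist with hd'def
      have hv2len : visit2.length = (n + 1).toNat := by
        rw [hv2def, length_foldl_pySetD]; exact hvl
      have hv2get : ∀ k : Nat, k < (n + 1).toNat →
          visit2.getD k false = (if (∃ i ∈ F, slotOf n i = k) then false else visit.getD k false) := by
        intro k hk
        rw [hv2def]
        exact getD_foldl_pySetD_slot n false hn F visit hvl hFr k false hk
      have hv1 : ∀ k : Nat, k < (n + 1).toNat →
          (visit2.getD k false = true ↔ dist.getD k 0 = -1) := by
        intro k hk
        obtain ⟨hs1, hs2, hs3⟩ := hslot k hk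
        rw [hv2get k hk]
        by_cases hkF : ∃ i ∈ F, slotOf n i = k
        · have hdk := hs1.mp hkF
          simp only [hkF, if_true]
          constructor
          · intro h; simp at h
          · intro h; exfalso; omega
        · simp only [hkF, if_false]
          rw [hs2]
          constructor
          · rintro (h | h)
            · exact h
            · exact absurd (hs1.mpr h) hkF
          · exact fun h => Or.inl h
      have htreemem : ∀ k : Nat, k < (n + 1).toNat → tree.getD k [] ∈ tree := by
        intro k hk
        rw [List.getD_eq_getElem _ _ (by omega)]
        exact List.getElem_mem _
      have hfilter : ∀ k : Nat, k < (n + 1).toNat →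
          (tree.getD k []).filter (fun node => PySem.List.pyGetD visit2 node false)
        = (tree.getD k []).filter (fun w => PySem.List.pyGetD dist w 0 == -1) := by
        intro k hk
        apply List.filter_congr
        intro w hw
        have hwb := hmem _ (htreemem k hk) w hw
        have hwk : slotOf n w < (n + 1).toNat := slot_lt n w hn hwb.1 hwb.2
        rw [pyGetD_slot n visit2 w false hn hv2len hwb.1 hwb.2,
          pyGetD_slot n dist w 0 hn hdl hwb.1 hwb.2]
        have hiff := hv1 (slotOf n w) hwk
        by_cases hdw : dist.getD (slotOf n w) 0 = -1
        · rw [hiff.mpr hdw, hdw]; simp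
        · have hvv : visit2.getD (slotOf n w) false = false := by
            cases hvb : visit2.getD (slotOf n w) false
            · rfl
            · exact absurd (hiff.mp hvb) hdw
          rw [hvv]
          symm
          simp only [beq_eq_false_iff_ne, ne_eq]
          exact hdw
      have htempmem : ∀ x : Int, (x ∈ temp ↔
          ∃ j ∈ F, x ∈ (PySem.List.pyGetD tree j []).filter
            (fun node => PySem.List.pyGetD visit2 node false)) := by
        intro x
        rw [htempdef]
        simp only [foldl_append_if_id]
        rw [mem_foldl_append]
        simp
      have hnxtmem : ∀ x : Int, (x ∈ nxt ↔
          ∃ v, v < (n + 1).toNat ∧ dist.getD v 0 = d ∧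
            x ∈ (tree.getD v []).filter (fun w => PySem.List.pyGetD dist w 0 == -1)) := by
        intro x
        rw [hnxtdef]
        rw [mem_foldl_ite_append (fun v => PySem.List.pyGetD dist (v : Int) 0 = d)
          (fun v => (PySem.List.pyGetD tree (v : Int) []).filter
            (fun w => PySem.List.pyGetD dist w 0 == -1)) x (List.range (n + 1).toNat) []]
        simp only [List.mem_range, List.not_mem_nil, false_or, PySem.List.pyGetD_natCast]
      have hEquiv : ∀ x : Int, (x ∈ temp ↔ x ∈ nxt) := by
        intro x
        rw [htempmem, hnxtmem]
        constructor
        · rintro ⟨j, hjF, hjx⟩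
          have hjb := hFr j hjF
          have hjk : slotOf n j < (n + 1).toNat := slot_lt n j hn hjb.1 hjb.2
          obtain ⟨hs1, hs2, hs3⟩ := hslot (slotOf n j) hjk
          refine ⟨slotOf n j, hjk, hs1.mp ⟨j, hjF, rfl⟩, ?_⟩
          rw [← hfilter (slotOf n j) hjk]
          rw [pyGetD_slot n tree j [] hn hlen hjb.1 hjb.2] at hjx
          exact hjx
        · rintro ⟨v, hv, hvd, hvx⟩
          obtain ⟨hs1, hs2, hs3⟩ := hslot v hv
          obtain ⟨j, hjF, hjs⟩ := hs1.mpr hvd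
          have hjb := hFr j hjF
          refine ⟨j, hjF, ?_⟩
          rw [pyGetD_slot n tree j [] hn hlen hjb.1 hjb.2, hjs, hfilter v hv]
          exact hvx
      have hempty : ((PySem.Set.ofList temp).length = 0) ↔ (nxt.length = 0) := by
        rw [List.length_eq_zero_iff, List.length_eq_zero_iff,
          List.eq_nil_iff_forall_not_mem, List.eq_nil_iff_forall_not_mem]
        constructor
        · intro h x hx
          exact h x ((PySem.Set.mem_ofList temp x).mpr ((hEquiv x).mpr hx))
        · intro h x hx
          exact h x ((hEquiv x).mp ((PySem.Set.mem_ofList temp x).mp hx))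
      by_cases hbr : (PySem.Set.ofList temp).length = 0
      · rw [if_pos hbr, if_pos (hempty.mp hbr)]
        have hcount : dist.count d = F.length := by
          rw [count_eq_countP_range, hdl]
          have := countP_range_eq_length (F.map (slotOf n)) (n + 1).toNat
            (fun k => dist.getD k 0 == d) (List.Nodup.map_on hFinj hnd)
            (by
              intro k hk
              rw [List.mem_map, beq_iff_eq]
              rw [← (hslot k hk).1])
            (by
              rintro k hk
              obtain ⟨x, hx, rfl⟩ := List.mem_map.1 hk
              have := hFr x hx
              exact slot_lt n x hn this.1 this.2)
          rw [this, List.length_map]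
        rw [hans, hcount]
      · rw [if_neg hbr, if_neg (fun h => hbr (hempty.mpr h))]
        have hnxtel : ∀ x ∈ nxt,
            ((-(n + 1) ≤ x ∧ x ≤ n) ∧ ∃ l ∈ tree, x ∈ l) ∧ dist.getD (slotOf n x) 0 = -1 := by
          intro x hx
          obtain ⟨v, hv, hvd, hvx⟩ := (hnxtmem x).mp hx
          rw [List.mem_filter] at hvx
          have hxb := hmem _ (htreemem v hv) x hvx.1
          refine ⟨⟨hxb, ⟨tree.getD v [], htreemem v hv, hvx.1⟩⟩, ?_⟩
          have hcond := hvx.2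
          rw [pyGetD_slot n dist x 0 hn hdl hxb.1 hxb.2, beq_iff_eq] at hcond
          exact hcond
        have hd'len : dist'.length = (n + 1).toNat := by
          rw [hd'def, length_foldl_pySetD]; exact hdl
        have hd'get : ∀ k : Nat, k < (n + 1).toNat →
            dist'.getD k 0 = (if (∃ w ∈ nxt, slotOf n w = k) then d + 1 else dist.getD k 0) := by
          intro k hk
          rw [hd'def]
          exact getD_foldl_pySetD_slot n (d + 1) hn nxt dist hdl
            (fun i hi => ((hnxtel i hi).1).1) k 0 hk
        have hmemtemp2 : ∀ x : Int, (x ∈ (PySem.Set.ofList temp) ↔ x ∈ nxt) :=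
          fun x => (PySem.Set.mem_ofList temp x).trans (hEquiv x)
        have hInv : LoopInv n visit2 dist' (PySem.Set.ofList temp) (d + 1) := by
          refine ⟨hv2len, hd'len, PySem.Set.nodup_ofList temp, ?_, ?_, by omega, ?_⟩
          · intro x hx
            exact ((hnxtel x ((hmemtemp2 x).mp hx)).1).1
          · intro x hx y hy hs
            obtain ⟨lx, hlx, hxlx⟩ := ((hnxtel x ((hmemtemp2 x).mp hx)).1).2
            obtain ⟨ly, hly, hyly⟩ := ((hnxtel y ((hmemtemp2 y).mp hy)).1).2
            exact hinj lx hlx x hxlx ly hly y hyly hs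
          · intro k hk
            obtain ⟨hs1, hs2, hs3⟩ := hslot k hk
            have hg := hd'get k hk
            refine ⟨?_, ?_, ?_⟩
            · rw [hg]
              by_cases hkn : ∃ w ∈ nxt, slotOf n w = k
              · rw [if_pos hkn]
                constructor
                · intro _; rfl
                · intro _
                  obtain ⟨w, hw, hws⟩ := hkn
                  exact ⟨w, (hmemtemp2 w).mpr hw, hws⟩
              · rw [if_neg hkn]
                constructor
                · rintro ⟨x, hx, hxs⟩
                  exact absurd ⟨x, (hmemtemp2 x).mp hx, hxs⟩ hkn
                · intro hc; exfalso; rcases hs3 with h3 | h3 <;> omega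
            · rw [hv1 k hk, hg]
              by_cases hkn : ∃ w ∈ nxt, slotOf n w = k
              · obtain ⟨w, hw, hws⟩ := hkn
                have hneg := (hnxtel w hw).2
                rw [hws] at hneg
                rw [if_pos ⟨w, hw, hws⟩]
                exact ⟨fun _ => Or.inr rfl, fun _ => hneg⟩
              · rw [if_neg hkn]
                constructor
                · exact fun h => Or.inl h
                · rintro (h | h)
                  · exact h
                  · exfalso; rcases hs3 with h3 | h3 <;> omega
            · rw [hg]
              by_cases hkn : ∃ w ∈ nxt, slotOf n w = k
              · rw [if_pos hkn]
                right; constructor <;> omega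
              · rw [if_neg hkn]
                rcases hs3 with h3 | h3
                · exact Or.inl h3
                · exact Or.inr ⟨h3.1, by omega⟩
        have hdec : dist'.count (-1) < dist.count (-1) := by
          rw [count_eq_countP_range dist, count_eq_countP_range dist', hd'len, hdl]
          have hne : nxt ≠ [] := by
            intro h
            exact hbr (hempty.mpr (by rw [h]; rfl))
          obtain ⟨x, hx⟩ := List.exists_mem_of_ne_nil nxt hne
          have hxel := hnxtel x hx
          have hxk : slotOf n x < (n + 1).toNat := slot_lt n x hn hxel.1.1.1 hxel.1.1.2
          apply countP_lt_countP _ _ (List.range (n + 1).toNat) ?_ (slotOf n x)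
            (List.mem_range.mpr hxk) ?_ ?_
          · intro k hkr hp'
            have hk := List.mem_range.mp hkr
            rw [beq_iff_eq] at hp'
            rw [hd'get k hk] at hp'
            by_cases hkn : ∃ w ∈ nxt, slotOf n w = k
            · rw [if_pos hkn] at hp'; exfalso; omega
            · rw [if_neg hkn] at hp'; rw [beq_iff_eq]; exact hp'
          · rw [beq_iff_eq]; exact hxel.2
          · rw [hd'get _ hxk, if_pos ⟨x, hx, rfl⟩]
            simp only [beq_eq_false_iff_ne, ne_eq]
            omega
        exact ih fB visit2 dist' (PySem.Set.ofList temp) (d + 1)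
          (answer ++ [PySem.Set.ofList temp]) hInv (by omega) (by omega)
          (by rw [List.getLastD_concat])

-- ===== VERDICT (by name: the statement is the Claim_ definition above) =====
theorem solution_spec : Claim_equal_solution := by
  intro n edge _ hpre
  obtain ⟨hn, hedge, hcoll⟩ := hpre
  unfold Spec_solution
  simp only [solution, solution_alt]
  have hfacts := buildTree_pres n edge
    (fun w => (-(n + 1) ≤ w ∧ w ≤ n) ∧ ∃ e ∈ edge, w ∈ e)
    (fun e he x hx => ⟨(hedge e he).2 x hx, ⟨e, he, hx⟩⟩)
  have hmem : ∀ l ∈ buildTree n edge, ∀ w ∈ l, -(n + 1) ≤ w ∧ w ≤ n :=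
    fun l hl w hw => (hfacts l hl w hw).1
  have hinj : ∀ l ∈ buildTree n edge, ∀ w ∈ l, ∀ l' ∈ buildTree n edge, ∀ w' ∈ l',
      slotOf n w = slotOf n w' → w = w' := by
    intro l hl w hw l' hl' w' hw' hs
    obtain ⟨hwb, e, he, hwe⟩ := hfacts l hl w hw
    obtain ⟨hwb', e', he', hwe'⟩ := hfacts l' hl' w' hw'
    apply hcoll e he w hwe e' he' w' hwe'
    rw [emod_eq_slot n w hn hwb.1 hwb.2, emod_eq_slot n w' hn hwb'.1 hwb'.2, hs]
  have hd0len : (PySem.List.pySetD (List.replicate (n + 1).toNat (-1 : Int)) 1 0).length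
      = (n + 1).toNat := by
    rw [PySem.List.length_pySetD, List.length_replicate]
  have hd0get : ∀ k : Nat, k < (n + 1).toNat →
      (PySem.List.pySetD (List.replicate (n + 1).toNat (-1 : Int)) 1 0).getD k 0
        = (if k = 1 then 0 else -1) := by
    intro k hk
    rw [getD_pySetD_slot n _ 1 0 hn (by simp) (by omega) (by omega) k hk 0, slot_one n]
    by_cases h1 : k = 1
    · rw [if_pos h1.symm, if_pos h1]
    · rw [if_neg (fun h => h1 h.symm), if_neg h1, List.getD_replicate _ hk]
  apply loop_eq n (buildTree n edge) hn (length_buildTree n edge) hmem hinj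
  · refine ⟨by simp, hd0len, by simp, ?_, ?_, le_refl 0, ?_⟩
    · intro x hx
      simp only [List.mem_singleton] at hx
      subst hx
      exact ⟨by omega, hn⟩
    · intro x hx y hy _
      simp only [List.mem_singleton] at hx hy
      rw [hx, hy]
    · intro k hk
      refine ⟨?_, ?_, ?_⟩
      · rw [hd0get k hk]
        constructor
        · rintro ⟨x, hx, hxs⟩
          simp only [List.mem_singleton] at hx
          subst hx
          rw [slot_one n] at hxs
          rw [if_pos hxs.symm]
        · intro h
          by_cases h1 : k = 1
          · exact ⟨1, by simp, by rw [slot_one n, h1]⟩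
          · rw [if_neg h1] at h; exact absurd h (by omega)
      · rw [List.getD_replicate _ hk, hd0get k hk]
        constructor
        · intro _
          by_cases h1 : k = 1
          · rw [if_pos h1]; exact Or.inr rfl
          · rw [if_neg h1]; exact Or.inl rfl
        · intro _; rfl
      · rw [hd0get k hk]
        by_cases h1 : k = 1
        · rw [if_pos h1]; exact Or.inr ⟨le_refl 0, le_refl 0⟩
        · rw [if_neg h1]; exact Or.inl rfl
  · have := List.count_le_length (a := (-1 : Int))
      (l := PySem.List.pySetD (List.replicate (n + 1).toNat (-1 : Int)) 1 0)
    omega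
  · have := List.count_le_length (a := (-1 : Int))
      (l := PySem.List.pySetD (List.replicate (n + 1).toNat (-1 : Int)) 1 0)
    omega
  · simp
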